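-- pv_equiv track=rewrite | github.com/Casper-Guo/AoC-Language-Exploration | 2015.py/day20.py | list_factors
-- ===== SOURCE A (Python) =====
-- from itertools import product
-- from math import prod
--
-- def list_factors(prime_factorization: dict[int, int]) -> list[int]:
--     """Given the prime factorization of a number, list all its factors."""
--     prime_factors = list(prime_factorization.keys())
--     exponents = [list(range(i + 1)) for i in prime_factorization.values()]
--
--     factors = []
--
--     for exponent_set in product(*exponents):
--         factors.append(
--             prod([factor ** exponent_set[idx] for idx, factor in enumerate(prime_factors)])
--         )
--
--     return factors
-- ===== SOURCE B (Python) =====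
-- def list_factors(prime_factorization: dict[int, int]) -> list[int]:
--     """Given the prime factorization of a number, list all its factors."""
--     factors = [1]
--     for prime, exponent in prime_factorization.items():
--         factors = [f * prime ** power for f in factors for power in range(exponent + 1)]
--     return factors
-- ===== Notes on version B (the rewrite author's own statement) =====
-- stated objective: alternative
-- what changed: B builds the factor list incrementally (factors = [f * p**power ...] per prime) instead of enumerating the Cartesian product of exponent tuples and recomputing prod() of all prime powers for every tuple.
import Mathlib
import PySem

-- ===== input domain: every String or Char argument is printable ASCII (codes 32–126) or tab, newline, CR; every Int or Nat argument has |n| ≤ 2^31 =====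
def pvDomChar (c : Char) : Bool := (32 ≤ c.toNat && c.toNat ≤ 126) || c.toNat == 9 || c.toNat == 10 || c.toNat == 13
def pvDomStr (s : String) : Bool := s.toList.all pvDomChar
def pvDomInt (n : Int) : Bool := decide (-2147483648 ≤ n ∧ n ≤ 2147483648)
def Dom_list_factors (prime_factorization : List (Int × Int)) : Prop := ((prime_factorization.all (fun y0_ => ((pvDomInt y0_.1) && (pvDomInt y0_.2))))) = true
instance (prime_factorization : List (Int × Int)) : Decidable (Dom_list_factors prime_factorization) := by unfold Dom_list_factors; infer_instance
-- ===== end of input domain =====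

-- B builds the factor list incrementally, one prime at a time, instead of taking the
-- Cartesian product of all exponent tuples and recomputing a full prod() per tuple
-- (objective: alternative; same output values in the same order).

-- ===== PORT A =====
-- itertools.product(*lists): hand port, exact — first list outermost, last list varies fastest
def pyProduct {α : Type} : List (List α) → List (List α)
  | [] => [[]]
  | xs :: rest => xs.flatMap (fun x => (pyProduct rest).map (x :: ·))

def list_factors (prime_factorization : List (Int × Int)) : List Int :=
  let d := PySem.Dict.ofList prime_factorization
  let prime_factors : List Int := PySem.Dict.keys d
  let exponents : List (List Int) := (PySem.Dict.values d).map (fun i => PySem.List.pyRange 0 (i + 1) 1)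
  let factors : List Int :=
    (pyProduct exponents).foldl
      (fun factors exponent_set =>
        factors ++ [((PySem.List.enumerate prime_factors).map
          (fun p => p.2 ^ (PySem.List.pyGetD exponent_set p.1 0).toNat)).prod])
      []
  factors

-- ===== PORT B =====
def list_factors_alt (prime_factorization : List (Int × Int)) : List Int :=
  (PySem.Dict.ofList prime_factorization).items.foldl
    (fun factors pe =>
      factors.flatMap (fun f =>
        (PySem.List.pyRange 0 (pe.2 + 1) 1).map (fun power => f * pe.1 ^ power.toNat)))
    [1]

-- ===== PRECONDITION & SPEC =====
def Spec_list_factors (prime_factorization : List (Int × Int)) (out : List Int) : Prop := out = list_factors_alt prime_factorization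
instance (prime_factorization : List (Int × Int)) (out : List Int) : Decidable (Spec_list_factors prime_factorization out) := by unfold Spec_list_factors; infer_instance

-- ===== CLAIM (what is proved, stated in full; the proofs are below) =====
def Claim_equal_list_factors : Prop := ∀ (prime_factorization : List (Int × Int)), Dom_list_factors prime_factorization → Spec_list_factors prime_factorization (list_factors prime_factorization)

-- ===== LEMMAS AND PROOFS =====

-- A's append-accumulator loop is just a map over the product tuples
theorem foldl_append_prod (ts : List (List Int)) (g : List Int → Int) (acc : List Int) :
    ts.foldl (fun factors es => factors ++ [g es]) acc = acc ++ ts.map g := by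
  induction ts generalizing acc with
  | nil => simp
  | cons t ts ih => simp [ih, List.append_assoc]

-- every tuple produced by pyProduct has one entry per input list
theorem length_of_mem_pyProduct {α : Type} (ls : List (List α)) (es : List α)
    (h : es ∈ pyProduct ls) : es.length = ls.length := by
  induction ls generalizing es with
  | nil => simp [pyProduct] at h; simp [h]
  | cons l ls ih =>
    simp [pyProduct] at h
    obtain ⟨x, _, es', hes', rfl⟩ := h
    simp [ih es' hes']

-- shifting enumerate's start by one is a map on the indices
theorem enumerate_succ_shift {α : Type} (xs : List α) (s : Int) :
    PySem.List.enumerate xs (s + 1) = (PySem.List.enumerate xs s).map (fun p => (p.1 + 1, p.2)) := by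
  induction xs generalizing s with
  | nil => simp [PySem.List.enumerate_nil]
  | cons x xs ih => simp [PySem.List.enumerate_cons, ih]

-- indexed product over enumerate = product over the zip, when the lengths agree
theorem enum_prod_eq_zip_prod (ks : List Int) (es : List Int) (h : es.length = ks.length) :
    ((PySem.List.enumerate ks).map (fun p => p.2 ^ (PySem.List.pyGetD es p.1 0).toNat)).prod
      = ((ks.zip es).map (fun pe => pe.1 ^ pe.2.toNat)).prod := by
  induction ks generalizing es with
  | nil => cases es <;> simp_all [PySem.List.enumerate_nil]
  | cons k ks ih =>
    cases es with
    | nil => simp at h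
    | cons e es =>
      simp only [List.length_cons, Nat.succ_inj] at h
      rw [PySem.List.enumerate_cons, show (0 : Int) + 1 = 0 + 1 from rfl, enumerate_succ_shift]
      simp only [List.map_cons, List.map_map, List.prod_cons, List.zip_cons_cons,
        PySem.List.pyGetD_zero_cons]
      congr 1
      rw [← ih es h]
      refine congrArg List.prod (List.map_congr_left ?_)
      intro p hp
      obtain ⟨j, hj, rfl⟩ := (PySem.List.mem_enumerate_iff _ _ _).mp hp
      simp only [Function.comp_apply, zero_add]
      have hc : (j : Int) + 1 = ((j + 1 : Nat) : Int) := by push_cast; ring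
      rw [hc, PySem.List.pyGetD_natCast, PySem.List.pyGetD_natCast]
      simp [List.getD]

-- the product-of-tuples value list, as one definition
def prodList (ps : List (Int × Int)) : List Int :=
  (pyProduct (ps.map (fun pe => PySem.List.pyRange 0 (pe.2 + 1) 1))).map
    (fun es => (((ps.map Prod.fst).zip es).map (fun pe => pe.1 ^ pe.2.toNat)).prod)

-- B's fold distributes: running it from any factor list multiplies each factor by each tuple product
theorem foldl_step_eq (ps : List (Int × Int)) (factors : List Int) :
    ps.foldl (fun factors pe =>
        factors.flatMap (fun f =>
          (PySem.List.pyRange 0 (pe.2 + 1) 1).map (fun power => f * pe.1 ^ power.toNat)))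
      factors
    = factors.flatMap (fun f => (prodList ps).map (fun v => f * v)) := by
  induction ps generalizing factors with
  | nil => simp [prodList, pyProduct]
  | cons pe ps ih =>
    rw [List.foldl_cons, ih]
    simp [prodList, pyProduct, Function.comp_def, List.map_flatMap, List.flatMap_map,
      List.flatMap_assoc, List.map_map, mul_assoc]

-- ===== VERDICT (by name: the statement is the Claim_ definition above) =====
theorem list_factors_spec : Claim_equal_list_factors := by
  intro pf _hdom
  unfold Spec_list_factors list_factors list_factors_alt
  dsimp only
  rw [foldl_step_eq]
  set ps := (PySem.Dict.ofList pf).items with hps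
  rw [show PySem.Dict.keys (PySem.Dict.ofList pf) = ps.map Prod.fst from rfl,
      show PySem.Dict.values (PySem.Dict.ofList pf) = ps.map Prod.snd from rfl,
      foldl_append_prod]
  simp only [List.nil_append, List.map_map, List.flatMap_cons, List.flatMap_nil,
    List.append_nil, one_mul, List.map_id']
  rw [show List.map ((fun i => PySem.List.pyRange 0 (i + 1) 1) ∘ Prod.snd) ps
        = ps.map (fun pe => PySem.List.pyRange 0 (pe.2 + 1) 1) by simp [Function.comp_def]]
  simp only [prodList]
  apply List.map_congr_left
  intro es hes
  have hlen : es.length = (ps.map Prod.fst).length := by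
    have := length_of_mem_pyProduct _ es hes
    simpa using this
  simpa using enum_prod_eq_zip_prod (ps.map Prod.fst) es hlen
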